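-- pv_equiv track=rewrite | github.com/vucoffee2310/Collection | hello.py | adjust_with_previous
-- ===== SOURCE A (Python) =====
-- def find_break_points(subarray, factor):
--     """
--     Identify indices where consecutive elements differ significantly based on factor.
--     Both elements must be != 1.
--     """
--     break_points = []
--     for i in range(len(subarray) - 1):
--         a, b = subarray[i], subarray[i + 1]
--         if a != 1 and b != 1 and max(a, b) >= factor * min(a, b):
--             break_points.append(i)
--     return break_points
--
-- def adjust_with_previous(subarrays, sums, factor):
--     """Move a prefix from current to previous subarray to reduce sum difference."""
--     adjusted = False
--     i = 1
--     while i < len(subarrays):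
--         curr_sum = sums[i]
--         prev_sum = sums[i - 1]
--         if curr_sum > prev_sum:
--             break_points = find_break_points(subarrays[i], factor)
--             if break_points:
--                 original_diff = abs(curr_sum - prev_sum)
--                 best_idx = None
--                 best_new_diff = original_diff
--                 best_prefix_sum = 0
--                 for idx in break_points:
--                     prefix = subarrays[i][:idx + 1]
--                     prefix_sum = sum(prefix)
--                     new_prev_sum = prev_sum + prefix_sum
--                     new_curr_sum = curr_sum - prefix_sum
--                     new_diff = abs(new_prev_sum - new_curr_sum)
--                     if new_diff < best_new_diff:
--                         best_new_diff = new_diff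
--                         best_idx = idx
--                         best_prefix_sum = prefix_sum
--                 if best_idx is not None and best_new_diff < original_diff:
--                     prefix = subarrays[i][:best_idx + 1]
--                     subarrays[i - 1].extend(prefix)
--                     subarrays[i] = subarrays[i][best_idx + 1:]
--                     sums[i - 1] += best_prefix_sum
--                     sums[i] -= best_prefix_sum
--                     adjusted = True
--         i += 1
--     return adjusted
-- ===== SOURCE B (Python) =====
-- def adjust_with_previous(subarrays, sums, factor):
--     """Move a prefix from current to previous subarray to reduce sum difference.
--
--     One pass per subarray: break points are detected and the prefix sum is
--     maintained incrementally while scanning, instead of building a break-point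
--     list and re-summing each prefix. Performs the same in-place mutations as
--     the original."""
--     if len(subarrays) < 2:
--         return False
--     adjusted = False
--     prev = sums[0]
--     for i in range(1, len(subarrays)):
--         curr = sums[i]
--         if curr > prev:
--             sub = subarrays[i]
--             diff = curr - prev
--             best, best_idx, best_ps = diff, None, 0
--             run = 0
--             for j in range(len(sub) - 1):
--                 run += sub[j]
--                 a, b = sub[j], sub[j + 1]
--                 if a != 1 and b != 1 and max(a, b) >= factor * min(a, b):
--                     nd = abs(diff - 2 * run)
--                     if nd < best:
--                         best, best_idx, best_ps = nd, j, run
--             if best_idx is not None: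
--                 subarrays[i - 1].extend(sub[:best_idx + 1])
--                 subarrays[i] = sub[best_idx + 1:]
--                 sums[i - 1] += best_ps
--                 sums[i] -= best_ps
--                 prev = curr - best_ps
--                 adjusted = True
--                 continue
--         prev = curr
--     return adjusted
-- ===== Notes on version B (the rewrite author's own statement) =====
-- stated objective: faster
-- what changed: Instead of building a break-point index list and re-summing the prefix slice for every break point, B scans each subarray once, detecting break points and maintaining a running prefix sum (and threads prev-sum instead of re-reading the mutated sums list); same return value and same in-place mutations.
import Mathlib
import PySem

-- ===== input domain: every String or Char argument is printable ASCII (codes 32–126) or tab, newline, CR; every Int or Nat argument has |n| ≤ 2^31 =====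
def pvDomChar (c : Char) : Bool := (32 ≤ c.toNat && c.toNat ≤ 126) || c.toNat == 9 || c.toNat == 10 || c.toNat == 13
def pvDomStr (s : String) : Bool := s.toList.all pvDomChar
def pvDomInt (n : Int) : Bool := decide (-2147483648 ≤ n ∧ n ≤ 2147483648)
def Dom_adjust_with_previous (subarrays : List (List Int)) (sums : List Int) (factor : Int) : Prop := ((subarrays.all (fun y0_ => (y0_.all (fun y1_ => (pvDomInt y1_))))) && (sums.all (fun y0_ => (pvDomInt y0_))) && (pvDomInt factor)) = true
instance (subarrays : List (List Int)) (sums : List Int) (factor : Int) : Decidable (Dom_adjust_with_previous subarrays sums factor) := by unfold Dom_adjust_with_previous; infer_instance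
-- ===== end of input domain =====

-- B replaces A's per-break-point prefix re-summing (build a break-point list, then sum each
-- prefix slice) by a single scan per subarray that maintains a running prefix sum; equal return
-- value and it performs the same in-place mutations in Python (the Lean claim is about the
-- return value).

-- ===== PORT A =====
-- port of find_break_points: the for-loop over consecutive pairs, as structural recursion
def fbpGo (factor : Int) : List Int → Nat → List Nat
  | a :: b :: rest, i =>
    if a ≠ 1 ∧ b ≠ 1 ∧ factor * min a b ≤ max a b
    then i :: fbpGo factor (b :: rest) (i + 1)
    else fbpGo factor (b :: rest) (i + 1)
  | _, _ => []

-- one step of A's inner `for idx in break_points` loop; state = (best_new_diff, best_idx, best_prefix_sum)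
def stepA (prev curr : Int) (sub : List Int) (st : Int × Option Nat × Int) (idx : Nat) : Int × Option Nat × Int :=
  let ps := (sub.take (idx + 1)).sum
  let nd := |prev + ps - (curr - ps)|
  if nd < st.1 then (nd, some idx, ps) else st

-- A's while-loop; the in-place writes to subarrays/sums are threaded as list state.
-- Indices are in range whenever Pre_ holds (Python raises IndexError otherwise), so getD's
-- defaults are unreachable on the claimed inputs.
def awpGo (factor : Int) : List (List Int) → List Int → Nat → Nat → Bool → Bool
  | _, _, _, 0, adjusted => adjusted
  | subs, sums, i, rem + 1, adjusted =>
    let curr := sums.getD i 0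
    let prev := sums.getD (i - 1) 0
    if prev < curr then
      let sub := subs.getD i []
      let bps := fbpGo factor sub 0
      if bps ≠ [] then
        let odiff := |curr - prev|
        let st := bps.foldl (stepA prev curr sub) (odiff, none, 0)
        match st.2.1 with
        | some bi =>
          if st.1 < odiff then
            awpGo factor
              ((subs.set (i - 1) (subs.getD (i - 1) [] ++ sub.take (bi + 1))).set i (sub.drop (bi + 1)))
              ((sums.set (i - 1) (prev + st.2.2)).set i (curr - st.2.2))
              (i + 1) rem true
          else awpGo factor subs sums (i + 1) rem adjusted
        | none => awpGo factor subs sums (i + 1) rem adjusted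
      else awpGo factor subs sums (i + 1) rem adjusted
    else awpGo factor subs sums (i + 1) rem adjusted

def adjust_with_previous (subarrays : List (List Int)) (sums : List Int) (factor : Int) : Bool :=
  awpGo factor subarrays sums 1 (subarrays.length - 1) false

-- ===== PORT B =====
-- B's single scan over consecutive pairs carrying the running prefix sum `run`;
-- state = (best, best_idx, best_ps)
def scanGo (factor diff : Int) : List Int → Nat → Int → Int × Option Nat × Int → Int × Option Nat × Int
  | a :: b :: rest, j, run, st =>
    let run' := run + a
    if a ≠ 1 ∧ b ≠ 1 ∧ factor * min a b ≤ max a b then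
      let nd := |diff - 2 * run'|
      if nd < st.1 then scanGo factor diff (b :: rest) (j + 1) run' (nd, some j, run')
      else scanGo factor diff (b :: rest) (j + 1) run' st
    else scanGo factor diff (b :: rest) (j + 1) run' st
  | _, _, _, st => st

-- B's main loop carrying `prev`; Source B's in-place writes are never read again by Source B's own
-- computation of the return value, so they contribute no state here.
def altGo (factor : Int) (subs : List (List Int)) (sums : List Int) : Nat → Nat → Int → Bool → Bool
  | 0, _, _, adjusted => adjusted
  | rem + 1, i, prev, adjusted =>
    let curr := sums.getD i 0
    if prev < curr then
      let st := scanGo factor (curr - prev) (subs.getD i []) 0 0 (curr - prev, none, 0)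
      match st.2.1 with
      | some _ => altGo factor subs sums rem (i + 1) (curr - st.2.2) true
      | none => altGo factor subs sums rem (i + 1) curr adjusted
    else altGo factor subs sums rem (i + 1) curr adjusted

def adjust_with_previous_alt (subarrays : List (List Int)) (sums : List Int) (factor : Int) : Bool :=
  if subarrays.length < 2 then false
  else altGo factor subarrays sums (subarrays.length - 1) 1 (sums.getD 0 0) false

-- ===== PRECONDITION & SPEC =====
-- Pre_ excludes exactly the inputs where Python A raises IndexError: when at least two
-- subarrays exist, sums must be at least as long as subarrays (A reads sums[i] for every i).
def Pre_adjust_with_previous (subarrays : List (List Int)) (sums : List Int) (factor : Int) : Prop :=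
  subarrays.length ≤ 1 ∨ subarrays.length ≤ sums.length
instance (subarrays : List (List Int)) (sums : List Int) (factor : Int) : Decidable (Pre_adjust_with_previous subarrays sums factor) := by unfold Pre_adjust_with_previous; infer_instance

def pvWitness_adjust_with_previous : List (List Int) × List Int × Int := ([[5, 1], [10, 2, 3]], [6, 15], 2)

def Spec_adjust_with_previous (subarrays : List (List Int)) (sums : List Int) (factor : Int) (out : Bool) : Prop := out = adjust_with_previous_alt subarrays sums factor
instance (subarrays : List (List Int)) (sums : List Int) (factor : Int) (out : Bool) : Decidable (Spec_adjust_with_previous subarrays sums factor out) := by unfold Spec_adjust_with_previous; infer_instance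

-- ===== CLAIM (what is proved, stated in full; the proofs are below) =====
def Claim_equal_adjust_with_previous : Prop := ∀ (subarrays : List (List Int)) (sums : List Int) (factor : Int), Dom_adjust_with_previous subarrays sums factor → Pre_adjust_with_previous subarrays sums factor → Spec_adjust_with_previous subarrays sums factor (adjust_with_previous subarrays sums factor)

-- ===== LEMMAS AND PROOFS =====

lemma scanGo_fst_le (factor diff : Int) :
    ∀ (l : List Int) (j : Nat) (run : Int) (st : Int × Option Nat × Int),
      (scanGo factor diff l j run st).1 ≤ st.1 := by
  intro l
  induction l with
  | nil => intro j run st; simp [scanGo]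
  | cons a tl ih =>
    intro j run st
    cases tl with
    | nil => simp [scanGo]
    | cons b rest =>
      simp only [scanGo]
      split_ifs with h1 h2
      · exact le_trans (ih (j+1) (run+a) _) (le_of_lt h2)
      · exact ih (j+1) (run+a) st
      · exact ih (j+1) (run+a) st

lemma scanGo_some_lt (factor diff : Int) :
    ∀ (l : List Int) (j : Nat) (run : Int) (b0 ps0 : Int),
      (scanGo factor diff l j run (b0, none, ps0)).2.1.isSome →
      (scanGo factor diff l j run (b0, none, ps0)).1 < b0 := by
  intro l
  induction l with
  | nil => intro j run b0 ps0 h; simp [scanGo] at h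
  | cons a tl ih =>
    intro j run b0 ps0 h
    cases tl with
    | nil => simp [scanGo] at h
    | cons b rest =>
      simp only [scanGo] at h ⊢
      split_ifs at h ⊢ with h1 h2
      · exact lt_of_le_of_lt (scanGo_fst_le factor diff (b :: rest) (j+1) (run+a) _) h2
      · exact ih (j+1) (run+a) b0 ps0 h
      · exact ih (j+1) (run+a) b0 ps0 h

lemma scan_eq_fold (factor prev curr : Int) (sub : List Int) :
    ∀ (l : List Int) (j : Nat) (run : Int) (st : Int × Option Nat × Int),
      l = sub.drop j → run = (sub.take j).sum →
      scanGo factor (curr - prev) l j run st = (fbpGo factor l j).foldl (stepA prev curr sub) st := by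
  intro l
  induction l with
  | nil => intro j run st _ _; simp [scanGo, fbpGo]
  | cons a tl ih =>
    intro j run st hdrop htake
    cases tl with
    | nil => simp [scanGo, fbpGo]
    | cons b rest =>
      have hj : sub[j]? = some a := by
        have h0 : (List.drop j sub)[0]? = sub[j + 0]? := List.getElem?_drop
        rw [← hdrop] at h0
        simpa using h0.symm
      have htail : b :: rest = sub.drop (j + 1) := by
        have h0 : List.drop 1 (List.drop j sub) = List.drop (j + 1) sub := List.drop_drop
        rw [← hdrop] at h0
        simpa using h0
      have hps : (sub.take (j + 1)).sum = run + a := by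
        rw [List.take_add_one, hj]
        simp [htake]
      have habs : |prev + (run + a) - (curr - (run + a))| = |curr - prev - 2 * (run + a)| := by
        rw [show prev + (run + a) - (curr - (run + a)) = -(curr - prev - 2 * (run + a)) by ring, abs_neg]
      have hstep : stepA prev curr sub st j =
          if |curr - prev - 2 * (run + a)| < st.1 then (|curr - prev - 2 * (run + a)|, some j, run + a) else st := by
        simp only [stepA, hps, habs]
      simp only [scanGo, fbpGo]
      split_ifs with h1 h2
      · rw [List.foldl_cons, hstep, if_pos h2]
        exact ih (j + 1) (run + a) _ htail hps.symm
      · rw [List.foldl_cons, hstep, if_neg h2]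
        exact ih (j + 1) (run + a) _ htail hps.symm
      · exact ih (j + 1) (run + a) _ htail hps.symm

lemma getD_set_ne' {α : Type} (l : List α) (d : α) (i j : Nat) (a : α) (h : i ≠ j) :
    (l.set i a).getD j d = l.getD j d := by
  simp [List.getD_eq_getElem?_getD, List.getElem?_set_ne h]

lemma getD_set_self' {α : Type} (l : List α) (d : α) (i : Nat) (a : α) (h : i < l.length) :
    (l.set i a).getD i d = a := by
  simp [List.getD_eq_getElem?_getD, h]

lemma go_eq (factor : Int) (subs0 : List (List Int)) (sums0 : List Int)
    (hlen : subs0.length ≤ sums0.length) :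
    ∀ (rem i : Nat) (subs : List (List Int)) (sums : List Int) (prev : Int) (adjusted : Bool),
      1 ≤ i → i + rem = subs0.length →
      subs.length = subs0.length → sums.length = sums0.length →
      (∀ j, i ≤ j → subs.getD j [] = subs0.getD j []) →
      (∀ j, i ≤ j → sums.getD j 0 = sums0.getD j 0) →
      prev = sums.getD (i - 1) 0 →
      awpGo factor subs sums i rem adjusted = altGo factor subs0 sums0 rem i prev adjusted := by
  intro rem
  induction rem with
  | zero => intros; simp [awpGo, altGo]
  | succ rem ih =>
    intro i subs sums prev adjusted hi hcnt hls hlsums hsubinv hsuminv hprev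
    have hiL : i < subs0.length := by omega
    have hiS : i < sums.length := by omega
    have hcurr : sums.getD i 0 = sums0.getD i 0 := hsuminv i le_rfl
    have hsub : subs.getD i [] = subs0.getD i [] := hsubinv i le_rfl
    simp only [awpGo, altGo]
    rw [hcurr, hsub, ← hprev]
    by_cases hlt : prev < sums0.getD i 0
    · rw [if_pos hlt, if_pos hlt]
      have habs : |sums0.getD i 0 - prev| = sums0.getD i 0 - prev := abs_of_pos (by omega)
      rw [habs]
      have hscan : scanGo factor (sums0.getD i 0 - prev) (subs0.getD i []) 0 0 (sums0.getD i 0 - prev, none, 0)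
          = (fbpGo factor (subs0.getD i []) 0).foldl (stepA prev (sums0.getD i 0) (subs0.getD i []))
              (sums0.getD i 0 - prev, none, 0) :=
        scan_eq_fold factor prev (sums0.getD i 0) (subs0.getD i []) (subs0.getD i []) 0 0 _
          (by simp) (by simp)
      rw [hscan]
      by_cases hbp : fbpGo factor (subs0.getD i []) 0 = []
      · rw [if_neg (by simpa using hbp), hbp]
        simp only [List.foldl_nil]
        exact ih (i + 1) subs sums (sums0.getD i 0) adjusted (by omega) (by omega) hls hlsums
          (fun j hj => hsubinv j (by omega)) (fun j hj => hsuminv j (by omega))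
          (by simpa using hcurr.symm)
      · rw [if_pos (by simpa using hbp)]
        cases hst : ((fbpGo factor (subs0.getD i []) 0).foldl
            (stepA prev (sums0.getD i 0) (subs0.getD i [])) (sums0.getD i 0 - prev, none, 0)).2.1 with
        | none =>
          exact ih (i + 1) subs sums (sums0.getD i 0) adjusted (by omega) (by omega) hls hlsums
            (fun j hj => hsubinv j (by omega)) (fun j hj => hsuminv j (by omega))
            (by simpa using hcurr.symm)
        | some bi =>
          have hless : ((fbpGo factor (subs0.getD i []) 0).foldl
              (stepA prev (sums0.getD i 0) (subs0.getD i [])) (sums0.getD i 0 - prev, none, 0)).1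
              < sums0.getD i 0 - prev := by
            have := scanGo_some_lt factor (sums0.getD i 0 - prev) (subs0.getD i []) 0 0
              (sums0.getD i 0 - prev) 0
            rw [hscan] at this
            exact this (by rw [hst]; rfl)
          dsimp only
          rw [if_pos hless]
          apply ih (i + 1) _ _ _ true (by omega) (by omega)
          · simpa using hls
          · simpa using hlsums
          · intro j hj
            rw [getD_set_ne' _ _ _ _ _ (by omega), getD_set_ne' _ _ _ _ _ (by omega)]
            exact hsubinv j (by omega)
          · intro j hj
            rw [getD_set_ne' _ _ _ _ _ (by omega), getD_set_ne' _ _ _ _ _ (by omega)]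
            exact hsuminv j (by omega)
          · simp only [Nat.add_sub_cancel]
            rw [getD_set_self' _ _ _ _ (by simpa using hiS)]
    · rw [if_neg hlt, if_neg hlt]
      exact ih (i + 1) subs sums (sums0.getD i 0) adjusted (by omega) (by omega) hls hlsums
        (fun j hj => hsubinv j (by omega)) (fun j hj => hsuminv j (by omega))
        (by simpa using hcurr.symm)

-- ===== VERDICT (by name: the statement is the Claim_ definition above) =====
theorem adjust_with_previous_spec : Claim_equal_adjust_with_previous := by
  intro subs sums factor _ hpre
  unfold Spec_adjust_with_previous adjust_with_previous adjust_with_previous_alt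
  by_cases h2 : subs.length < 2
  · rw [if_pos h2]
    have h0 : subs.length - 1 = 0 := by omega
    rw [h0]
    simp [awpGo]
  · rw [if_neg h2]
    have hlen : subs.length ≤ sums.length := by
      unfold Pre_adjust_with_previous at hpre
      rcases hpre with h | h
      · omega
      · exact h
    exact go_eq factor subs sums hlen (subs.length - 1) 1 subs sums (sums.getD 0 0) false
      le_rfl (by omega) rfl rfl (fun _ _ => rfl) (fun _ _ => rfl) rfl
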